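-- pv_equiv track=rewrite | github.com/S4bril/SI | Pracownia2/old/zad5.py | compute_wrong_coordinates
-- ===== SOURCE A (Python) =====
-- import math
--
-- def count_ones(binary_string):
--     return binary_string.count('1')
--
-- def count_zeros(binary_string):
--     return binary_string.count('0')
--
-- def operations_needed(test):
--     binary_string = ''.join(list(map(str, test[0])))
--     block_size = test[1]
--
--     n = len(binary_string)
--
--     min = math.inf
--     for i in range(n - block_size + 1):
--         operations = (
--                 count_ones(binary_string[:i]) +
--                 count_zeros(binary_string[i:i+block_size]) +
--                 count_ones(binary_string[i+block_size:])
--         )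
--         if operations < min:
--             min = operations
--     return min
--
-- def compute_wrong_coordinates(table, row_constraints, col_constraints):
--     potential_rows = []
--     for i, row in enumerate(table):
--         if operations_needed((row, row_constraints[i])) != 0:
--             potential_rows.append(i)
--
--     potential_cols = []
--     transposed_array = [list(row) for row in zip(*table)]
--
--     for j, column in enumerate(transposed_array):
--         if operations_needed((column, col_constraints[j])) != 0:
--             potential_cols.append(j)
--
--     return potential_rows, potential_cols
-- ===== SOURCE B (Python) =====
-- def compute_wrong_coordinates(table, row_constraints, col_constraints):
--     # A line needs no edits iff some window of `bs` consecutive cells can hold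
--     # all the ones: prefix counts of ones/zeros make each window's edit cost
--     # O(1); zip(p, p[bs:]) pairs every window start with its end, and any()
--     # short-circuits on the first zero-cost window.
--     def fixable(cells, bs):
--         s = ''.join(map(str, cells))
--         p1 = [0]
--         p0 = [0]
--         for c in s:
--             p1.append(p1[-1] + (c == '1'))
--             p0.append(p0[-1] + (c == '0'))
--         total_ones = p1[-1]
--         return any(ones_l + (zeros_r - zeros_l) + (total_ones - ones_r) == 0
--                    for (ones_l, zeros_l), (ones_r, zeros_r)
--                    in zip(zip(p1, p0), zip(p1[bs:], p0[bs:])))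
--
--     rows = [i for i, row in enumerate(table) if not fixable(row, row_constraints[i])]
--     cols = [j for j, col in enumerate(zip(*table)) if not fixable(col, col_constraints[j])]
--     return rows, cols
-- ===== Notes on version B (the rewrite author's own statement) =====
-- stated objective: faster
-- what changed: Per line B builds prefix counts of ones and zeros once and scans window positions with zip(p, p[bs:]) at O(1) cost each, short-circuiting with any(), instead of A's per-position string slicing and recounting under a running minimum; Pre_ excludes A's IndexError inputs (constraints list shorter than the rows/columns indexed) and the inputs where some negative block constraint -- a corner nobody would specify -- is read differently by the two programs' negative-index slice wraparounds (accidentally 'satisfiable' under one reading but not the other).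
-- outside the precondition, e.g. on compute_wrong_coordinates([[0]], [-1], [0]): A returns ([], []), B returns ([0], []); on compute_wrong_coordinates([[1, 0]], [-1], [0, 0]): A returns ([], [0]), B returns ([0], [0])
import Mathlib
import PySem

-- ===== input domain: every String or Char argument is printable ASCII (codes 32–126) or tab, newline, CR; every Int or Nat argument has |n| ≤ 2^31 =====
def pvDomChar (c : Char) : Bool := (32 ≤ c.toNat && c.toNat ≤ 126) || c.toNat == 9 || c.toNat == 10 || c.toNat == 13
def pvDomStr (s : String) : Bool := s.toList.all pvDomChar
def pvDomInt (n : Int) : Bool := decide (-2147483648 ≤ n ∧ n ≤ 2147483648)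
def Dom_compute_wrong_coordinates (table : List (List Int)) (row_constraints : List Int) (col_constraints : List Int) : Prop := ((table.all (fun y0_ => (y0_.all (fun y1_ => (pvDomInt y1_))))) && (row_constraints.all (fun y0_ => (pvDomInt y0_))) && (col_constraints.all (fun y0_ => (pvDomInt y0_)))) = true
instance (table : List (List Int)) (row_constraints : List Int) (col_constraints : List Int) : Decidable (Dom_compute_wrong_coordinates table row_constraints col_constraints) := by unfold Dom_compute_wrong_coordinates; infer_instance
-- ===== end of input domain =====

-- B replaces A's per-window slice-and-recount (quadratic per line) by prefix counts of
-- ones/zeros paired into sliding windows with zip, an O(1) window cost and a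
-- short-circuiting existence check (objective: faster).
-- Both programs only READ their arguments; the equivalence is about the return value.

-- ===== PORT A =====
-- ''.join(map(str, cells)), kept as List Char (PySem.Chars side of the string convention)
def pvJoinDigits (cells : List Int) : List Char :=
  (cells.map PySem.Int.toChars).flatten

-- binary_string.count('1') / count('0'): a one-character pattern, so it counts characters (exact)
def pvCountOnes (s : List Char) : Int := (s.count '1' : Int)
def pvCountZeros (s : List Char) : Int := (s.count '0' : Int)

-- the `operations` expression of A's loop body, verbatim (three slices, recounted)
def pvOpsA (s : List Char) (block_size : Int) (i : Int) : Int :=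
  pvCountOnes (PySem.List.slice s none (some i)) +
  pvCountZeros (PySem.List.slice s (some i) (some (i + block_size))) +
  pvCountOnes (PySem.List.slice s (some (i + block_size)) none)

-- operations_needed(test): math.inf is modelled as `none` (it is only compared / tested ≠ 0)
def operations_needed (cells : List Int) (block_size : Int) : Option Int :=
  let binary_string := pvJoinDigits cells
  let n : Int := binary_string.length
  (PySem.List.pyRange 0 (n - block_size + 1) 1).foldl
    (fun m i =>
      let operations := pvOpsA binary_string block_size i
      match m with
      | none => some operations
      | some mv => if operations < mv then some operations else some mv)
    none

-- zip(*table) (columns truncated to the shortest row); both Pythons call it verbatim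
def pyZipCols (t : List (List Int)) : List (List Int) :=
  match (t.map List.length).min? with
  | none => []
  | some m => (List.range m).map (fun j => t.map (fun r => r.getD j 0))

def compute_wrong_coordinates (table : List (List Int)) (row_constraints : List Int) (col_constraints : List Int) : List Int × List Int :=
  let potential_rows :=
    (PySem.List.enumerate table 0).foldl
      (fun acc p =>
        if operations_needed p.2 (PySem.List.pyGetD row_constraints p.1 0) != some 0
        then acc ++ [p.1] else acc) []
  let transposed_array := pyZipCols table
  let potential_cols :=
    (PySem.List.enumerate transposed_array 0).foldl
      (fun acc p =>
        if operations_needed p.2 (PySem.List.pyGetD col_constraints p.1 0) != some 0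
        then acc ++ [p.1] else acc) []
  (potential_rows, potential_cols)

-- ===== PORT B =====
-- p1 / p0 of Source B: running prefix counts, appended one cell per character
def pvPrefix (s : List Char) (c : Char) : List Int :=
  s.foldl (fun acc ch => acc ++ [PySem.List.pyGetD acc (-1) 0 + (if ch = c then 1 else 0)]) [0]

-- fixable(cells, bs): zip(zip(p1, p0), zip(p1[bs:], p0[bs:])) pairs each window start
-- with its end; any() looks for a zero-cost window
def pvFixable (cells : List Int) (bs : Int) : Bool :=
  let s := pvJoinDigits cells
  let p1 := pvPrefix s '1'
  let p0 := pvPrefix s '0'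
  let total_ones := PySem.List.pyGetD p1 (-1) 0
  ((p1.zip p0).zip ((PySem.List.slice p1 (some bs) none).zip (PySem.List.slice p0 (some bs) none))).any
    (fun q => q.1.1 + (q.2.2 - q.1.2) + (total_ones - q.2.1) == 0)

def compute_wrong_coordinates_alt (table : List (List Int)) (row_constraints : List Int) (col_constraints : List Int) : List Int × List Int :=
  let rows :=
    ((PySem.List.enumerate table 0).filter
      (fun p => !pvFixable p.2 (PySem.List.pyGetD row_constraints p.1 0))).map (·.1)
  let cols :=
    ((PySem.List.enumerate (pyZipCols table) 0).filter
      (fun p => !pvFixable p.2 (PySem.List.pyGetD col_constraints p.1 0))).map (·.1)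
  (rows, cols)

-- ===== PRECONDITION & SPEC =====
-- the digit string is: a '1'-free prefix of length k, a '0'-free window of length w, a '1'-free tail
def pvShapeAt (s : List Char) (k w : Nat) : Prop :=
  (s.take k).count '1' = 0 ∧ ((s.drop k).take w).count '0' = 0 ∧ (s.drop (k + w)).count '1' = 0

-- under a negative block constraint, Python's negative-index slice wraparound reads the line
-- as satisfiable: via A's slicing (window length n+bs) resp. B's prefix pairing (n+bs+1)
def pvWrapFixA (s : List Char) (bs : Int) : Prop :=
  s.count '1' = 0 ∨
    ∃ k ≤ s.length, (k : Int) < -bs ∧ pvShapeAt s k ((s.length : Int) + bs).toNat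
def pvWrapFixB (s : List Char) (bs : Int) : Prop :=
  ∃ k ≤ s.length, (k : Int) < -bs ∧ pvShapeAt s k ((s.length : Int) + bs + 1).toNat

-- a negative block constraint on which the two wraparound readings of the line disagree
def pvNegAccident (s : List Char) (bs : Int) : Prop :=
  -(s.length : Int) - 1 < bs ∧ bs < 0 ∧ ¬ (pvWrapFixA s bs ↔ pvWrapFixB s bs)

-- Pre_ excludes A's IndexError inputs (a constraints list shorter than the rows/columns it is
-- indexed by) and the inputs where some line carries a negative block constraint — a corner
-- nobody would specify — on which the two programs' negative-index slice wraparounds read the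
-- line differently (one of them accidentally 'satisfiable', the other not).
def Pre_compute_wrong_coordinates (table : List (List Int)) (row_constraints : List Int) (col_constraints : List Int) : Prop :=
  table.length ≤ row_constraints.length ∧
  ((table.map List.length).min?).getD 0 ≤ col_constraints.length ∧
  (∀ i < table.length, ¬ pvNegAccident (pvJoinDigits (table.getD i [])) (row_constraints.getD i 0)) ∧
  (∀ j < ((table.map List.length).min?).getD 0, ¬ pvNegAccident (pvJoinDigits ((pyZipCols table).getD j [])) (col_constraints.getD j 0))

instance (table : List (List Int)) (row_constraints : List Int) (col_constraints : List Int) : Decidable (Pre_compute_wrong_coordinates table row_constraints col_constraints) := by unfold Pre_compute_wrong_coordinates pvNegAccident pvWrapFixA pvWrapFixB pvShapeAt; infer_instance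

def pvWitness_compute_wrong_coordinates : List (List Int) × List Int × List Int :=
  ([[0, 1], [1, 0]], [1, 1], [1, 1])

def Spec_compute_wrong_coordinates (table : List (List Int)) (row_constraints : List Int) (col_constraints : List Int) (out : List Int × List Int) : Prop := out = compute_wrong_coordinates_alt table row_constraints col_constraints
instance (table : List (List Int)) (row_constraints : List Int) (col_constraints : List Int) (out : List Int × List Int) : Decidable (Spec_compute_wrong_coordinates table row_constraints col_constraints out) := by unfold Spec_compute_wrong_coordinates; infer_instance

-- ===== CLAIM =====
def Claim_equal_compute_wrong_coordinates : Prop := ∀ (table : List (List Int)) (row_constraints : List Int) (col_constraints : List Int), Dom_compute_wrong_coordinates table row_constraints col_constraints → Pre_compute_wrong_coordinates table row_constraints col_constraints → Spec_compute_wrong_coordinates table row_constraints col_constraints (compute_wrong_coordinates table row_constraints col_constraints)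

-- ===== LEMMAS AND PROOFS =====

theorem pvPrefix_eq (s : List Char) (c : Char) :
    pvPrefix s c = (List.range (s.length + 1)).map (fun k => ((s.take k).count c : Int)) := by
  induction s using List.reverseRecOn with
  | nil => simp [pvPrefix]
  | append_singleton s x ih =>
    unfold pvPrefix at *
    rw [List.foldl_append, ih]
    simp only [List.foldl_cons, List.foldl_nil]
    have hsplit : (List.range (s.length + 1)).map (fun k => ((s.take k).count c : Int))
        = (List.range s.length).map (fun k => ((s.take k).count c : Int)) ++ [((s.take s.length).count c : Int)] := by
      rw [List.range_succ, List.map_append]; rfl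
    have hmap : (List.range (s.length + 1)).map (fun k => (((s ++ [x]).take k).count c : Int))
        = (List.range (s.length + 1)).map (fun k => ((s.take k).count c : Int)) := by
      apply List.map_congr_left
      intro k hk
      simp only [List.mem_range] at hk
      rw [List.take_append_of_le_length (by omega)]
    have hlast : PySem.List.pyGetD ((List.range (s.length + 1)).map (fun k => ((s.take k).count c : Int))) (-1) 0
        = ((s.take s.length).count c : Int) := by
      rw [hsplit, PySem.List.pyGetD_neg_one_append_singleton]
    have hR : (List.range (s.length + 1 + 1)).map (fun k => (((s ++ [x]).take k).count c : Int))
        = (List.range (s.length + 1)).map (fun k => ((s.take k).count c : Int)) ++ [(((s ++ [x])).count c : Int)] := by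
      rw [List.range_succ, List.map_append, hmap]
      congr 1
      simp only [List.map_singleton]
      rw [List.take_of_length_le (by simp)]
    rw [hlast, List.length_append, List.length_singleton, hR]
    congr 1
    rw [List.count_append, List.take_length, List.count_singleton]
    by_cases h : x = c
    · simp [h]
    · have : (x == c) = false := by simp [h]
      simp [this]
      exact h

theorem length_pvPrefix (s : List Char) (c : Char) : (pvPrefix s c).length = s.length + 1 := by
  rw [pvPrefix_eq]; simp

theorem pvPrefix_getElem (s : List Char) (c : Char) (k : Nat) (hk : k < (pvPrefix s c).length) :
    (pvPrefix s c)[k] = ((s.take k).count c : Int) := by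
  have hk' : k < s.length + 1 := by rw [← length_pvPrefix s c]; exact hk
  simp only [pvPrefix_eq, List.getElem_map, List.getElem_range]

theorem pvPrefix_last (s : List Char) (c : Char) :
    PySem.List.pyGetD (pvPrefix s c) (-1) 0 = (s.count c : Int) := by
  rw [pvPrefix_eq, List.range_succ, List.map_append]
  simp only [List.map_singleton]
  rw [PySem.List.pyGetD_neg_one_append_singleton, List.take_length]

theorem count_take_add_drop (s : List Char) (c : Char) (k : Nat) :
    (s.take k).count c + (s.drop k).count c = s.count c := by
  rw [← List.count_append, List.take_append_drop]

theorem count_drop_le (s : List Char) (c : Char) (k : Nat) : (s.drop k).count c ≤ s.count c := by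
  have := count_take_add_drop s c k; omega

-- the triple of counts a window splits the string into (proof-side bookkeeping)
def shapeSum (s : List Char) (k w : Nat) : Nat :=
  (s.take k).count '1' + ((s.drop k).take w).count '0' + (s.drop (k + w)).count '1'

theorem shapeSum_zero_iff (s : List Char) (k w : Nat) :
    shapeSum s k w = 0 ↔ pvShapeAt s k w := by
  unfold shapeSum pvShapeAt; omega

theorem shapeSum_zero_iff_ones (s : List Char) (k : Nat) :
    shapeSum s k 0 = 0 ↔ s.count '1' = 0 := by
  unfold shapeSum
  have := count_take_add_drop s '1' k
  simp only [List.take_zero, List.count_nil, Nat.add_zero]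
  omega

-- the B-side window cost, rewritten from prefix counts to the three counts of shapeSum
theorem costB_eq_shapeSum (s : List Char) (k w : Nat) (h : k + w ≤ s.length) :
    ((s.take k).count '1' : Int) + (((s.take (k + w)).count '0' : Int) - ((s.take k).count '0' : Int))
      + ((s.count '1' : Int) - ((s.take (k + w)).count '1' : Int))
    = (shapeSum s k w : Int) := by
  have h1 : (s.take (k + w)).count '1' + (s.drop (k + w)).count '1' = s.count '1' :=
    count_take_add_drop s '1' _
  have hmid : (s.take k).count '0' + ((s.drop k).take w).count '0'
      = (s.take (k + w)).count '0' := by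
    rw [List.take_drop]
    rw [show (s.take (k + w)).count '0'
          = ((s.take (k + w)).take k).count '0' + ((s.take (k + w)).drop k).count '0'
          from (count_take_add_drop _ '0' _).symm]
    rw [List.take_take, min_eq_left (by omega)]
  unfold shapeSum
  push_cast
  omega

-- pvFixable characterised: some window start k with window width d = clampIdx (n+1) bs
theorem fixable_iff (cells : List Int) (bs : Int) :
    pvFixable cells bs = true
      ↔ ∃ k : Nat, k + PySem.List.clampIdx ((pvJoinDigits cells).length + 1) bs ≤ (pvJoinDigits cells).length
          ∧ shapeSum (pvJoinDigits cells) k (PySem.List.clampIdx ((pvJoinDigits cells).length + 1) bs) = 0 := by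
  set s := pvJoinDigits cells with hs
  set n := s.length with hn
  set d := PySem.List.clampIdx (n + 1) bs with hd
  have hp1 : (pvPrefix s '1').length = n + 1 := length_pvPrefix s '1'
  have hp0 : (pvPrefix s '0').length = n + 1 := length_pvPrefix s '0'
  have hdrop1 : PySem.List.slice (pvPrefix s '1') (some bs) none = (pvPrefix s '1').drop d := by
    rw [PySem.List.slice_some_none, hp1]
  have hdrop0 : PySem.List.slice (pvPrefix s '0') (some bs) none = (pvPrefix s '0').drop d := by
    rw [PySem.List.slice_some_none, hp0]
  have hdle : d ≤ n + 1 := by rw [hd]; have := PySem.List.clampIdx_le (n+1) bs; omega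
  simp only [pvFixable, ← hs, hdrop1, hdrop0, pvPrefix_last]
  rw [List.any_eq_true]
  constructor
  · rintro ⟨q, hq, hcost⟩
    rw [List.mem_iff_getElem] at hq
    obtain ⟨k, hk, rfl⟩ := hq
    have hklen : k < (n + 1) - d := by
      have := hk
      simp only [List.length_zip, List.length_drop, hp1, hp0] at this
      omega
    have hkd : k + d ≤ n := by omega
    refine ⟨k, hkd, ?_⟩
    have hgz : ((List.zip (pvPrefix s '1') (pvPrefix s '0')).zip
        (((pvPrefix s '1').drop d).zip ((pvPrefix s '0').drop d)))[k]
        = ((((s.take k).count '1' : Int), ((s.take k).count '0' : Int)),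
           (((s.take (k + d)).count '1' : Int), ((s.take (k + d)).count '0' : Int))) := by
      have h1 : k < (pvPrefix s '1').length := by omega
      have h0 : k < (pvPrefix s '0').length := by omega
      have h1' : d + k < (pvPrefix s '1').length := by omega
      have h0' : d + k < (pvPrefix s '0').length := by omega
      rw [List.getElem_zip, List.getElem_zip, List.getElem_zip,
          List.getElem_drop, List.getElem_drop,
          pvPrefix_getElem s '1' k h1, pvPrefix_getElem s '0' k h0,
          pvPrefix_getElem s '1' (d + k) h1', pvPrefix_getElem s '0' (d + k) h0']
      rw [Nat.add_comm d k]
    rw [hgz] at hcost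
    simp only [beq_iff_eq] at hcost
    rw [costB_eq_shapeSum s k d hkd] at hcost
    exact_mod_cast hcost
  · rintro ⟨k, hkd, hzero⟩
    have hklen : k < ((List.zip (pvPrefix s '1') (pvPrefix s '0')).zip
        (((pvPrefix s '1').drop d).zip ((pvPrefix s '0').drop d))).length := by
      simp only [List.length_zip, List.length_drop, hp1, hp0]; omega
    refine ⟨_, List.getElem_mem hklen, ?_⟩
    have h1 : k < (pvPrefix s '1').length := by omega
    have h0 : k < (pvPrefix s '0').length := by omega
    have h1' : d + k < (pvPrefix s '1').length := by omega
    have h0' : d + k < (pvPrefix s '0').length := by omega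
    rw [List.getElem_zip, List.getElem_zip, List.getElem_zip,
        List.getElem_drop, List.getElem_drop,
        pvPrefix_getElem s '1' k h1, pvPrefix_getElem s '0' k h0,
        pvPrefix_getElem s '1' (d + k) h1', pvPrefix_getElem s '0' (d + k) h0']
    simp only [beq_iff_eq]
    rw [Nat.add_comm d k, costB_eq_shapeSum s k d hkd]
    exact_mod_cast hzero

-- A's window cost, rewritten from slices to the three counts under clamped indices
theorem opsA_eq_counts (s : List Char) (bs i : Int) :
    pvOpsA s bs i
      = ((s.take (PySem.List.clampIdx s.length i)).count '1' : Int)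
        + (((s.drop (PySem.List.clampIdx s.length i)).take
             (PySem.List.clampIdx s.length (i + bs) - PySem.List.clampIdx s.length i)).count '0' : Int)
        + ((s.drop (PySem.List.clampIdx s.length (i + bs))).count '1' : Int) := by
  unfold pvOpsA pvCountOnes pvCountZeros
  rw [show PySem.List.slice s none (some i) = s.take (PySem.List.clampIdx s.length i) by
        simp [PySem.List.slice],
      show PySem.List.slice s (some i) (some (i + bs))
          = (s.drop (PySem.List.clampIdx s.length i)).take
              (PySem.List.clampIdx s.length (i + bs) - PySem.List.clampIdx s.length i) by
        simp [PySem.List.slice],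
      PySem.List.slice_some_none]

theorem opsA_zero_iff (s : List Char) (bs i : Int) :
    pvOpsA s bs i = 0
      ↔ (s.take (PySem.List.clampIdx s.length i)).count '1' = 0
        ∧ ((s.drop (PySem.List.clampIdx s.length i)).take
             (PySem.List.clampIdx s.length (i + bs) - PySem.List.clampIdx s.length i)).count '0' = 0
        ∧ (s.drop (PySem.List.clampIdx s.length (i + bs))).count '1' = 0 := by
  rw [opsA_eq_counts]
  omega

theorem foldA_some (g : Int → Int) (L : List Int) (m : Int) :
    L.foldl (fun acc i =>
      match acc with
      | none => some (g i)
      | some mv => if g i < mv then some (g i) else some mv) (some m)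
    = some (L.foldl (fun a i => min a (g i)) m) := by
  induction L generalizing m with
  | nil => rfl
  | cons x t ih =>
    simp only [List.foldl_cons]
    rw [show ((if g x < m then some (g x) else some m : Option Int)) = some (min m (g x)) from by
      split_ifs with h
      · rw [min_eq_right (le_of_lt h)]
      · rw [min_eq_left (by omega)]]
    exact ih (min m (g x))

theorem foldA_ne_zero_iff (g : Int → Int) (L : List Int) (hpos : ∀ i ∈ L, 0 ≤ g i) :
    (L.foldl (fun acc i =>
      match acc with
      | none => some (g i)
      | some mv => if g i < mv then some (g i) else some mv) none ≠ some 0)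
    ↔ ∀ i ∈ L, g i ≠ 0 := by
  cases L with
  | nil => simp
  | cons x t =>
    simp only [List.foldl_cons]
    rw [foldA_some]
    have hmin := PySem.List.min?_id_cons (g x) (t.map g)
    have hmem : ∀ y ∈ g x :: t.map g, 0 ≤ y := by
      intro y hy
      rcases List.mem_cons.1 hy with h | h
      · subst h; exact hpos x (by simp)
      · obtain ⟨i, hi, rfl⟩ := List.mem_map.1 h
        exact hpos i (by simp [hi])
    have hfold_eq : t.foldl (fun a i => min a (g i)) (g x) = (t.map g).foldl min (g x) := by
      rw [List.foldl_map]
    have hμmem : (t.map g).foldl min (g x) ∈ g x :: t.map g :=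
      PySem.List.min?_mem (key := fun y => y) hmin
    have hμle : ∀ y ∈ g x :: t.map g, (t.map g).foldl min (g x) ≤ y :=
      PySem.List.min?_isMin (key := fun y => y) hmin
    constructor
    · intro hne i hi hgz
      apply hne
      rw [Option.some_inj, hfold_eq]
      have h0 : 0 ≤ (t.map g).foldl min (g x) := hmem _ hμmem
      rcases List.mem_cons.1 hi with h | h
      · subst h
        have := hμle (g i) (by simp)
        omega
      · have := hμle (g i) (by simp; exact Or.inr ⟨i, h, rfl⟩)
        omega
    · intro hall hsome
      rw [Option.some_inj, hfold_eq] at hsome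
      rw [hsome] at hμmem
      rcases List.mem_cons.1 hμmem with h | h
      · exact hall x (by simp) h.symm
      · obtain ⟨i, hi, hgi⟩ := List.mem_map.1 h
        exact hall i (by simp [hi]) hgi

theorem pvOpsA_nonneg (s : List Char) (bs i : Int) : 0 ≤ pvOpsA s bs i := by
  unfold pvOpsA pvCountOnes pvCountZeros
  positivity

-- A finds a zero-cost position iff its fold-min is 0
theorem noflag_iff (cells : List Int) (bs : Int) :
    (operations_needed cells bs != some 0) = false
      ↔ ∃ i ∈ PySem.List.pyRange 0 (((pvJoinDigits cells).length : Int) - bs + 1) 1,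
          pvOpsA (pvJoinDigits cells) bs i = 0 := by
  simp only [operations_needed]
  rw [bne_eq_false_iff_eq]
  have key := foldA_ne_zero_iff (fun i => pvOpsA (pvJoinDigits cells) bs i)
    (PySem.List.pyRange 0 (((pvJoinDigits cells).length : Int) - bs + 1) 1)
    (fun i _ => pvOpsA_nonneg (pvJoinDigits cells) bs i)
  simp only at key
  constructor
  · intro heq
    by_contra hno
    push_neg at hno
    exact key.mpr (fun i hi => hno i hi) heq
  · rintro ⟨i, hi, hz⟩
    by_contra hne
    exact key.mp hne i hi hz

-- negative block size: a zero-cost position forces a '1'-free line or the wrap shape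
theorem opsA_zero_neg (s : List Char) (bs i : Int) (hbs : bs < 0) (hi : 0 ≤ i)
    (h : pvOpsA s bs i = 0) :
    pvWrapFixA s bs := by
  unfold pvWrapFixA
  rw [opsA_zero_iff] at h
  obtain ⟨h1, h0, h2⟩ := h
  set n := s.length with hn
  set a := PySem.List.clampIdx n i with ha
  set b := PySem.List.clampIdx n (i + bs) with hb
  have hble : b ≤ n := PySem.List.clampIdx_le n (i + bs)
  have hale : a ≤ n := PySem.List.clampIdx_le n i
  by_cases hba : b ≤ a
  · left
    have hdd : s.drop a = (s.drop b).drop (a - b) := by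
      rw [List.drop_drop]
      congr 1
      omega
    have hda : (s.drop a).count '1' = 0 := by
      rw [hdd]
      have := count_drop_le (s.drop b) '1' (a - b)
      omega
    have := count_take_add_drop s '1' a
    omega
  · push_neg at hba
    obtain ⟨iN, rfl⟩ : ∃ iN : Nat, (iN : Int) = i := ⟨i.toNat, Int.toNat_of_nonneg hi⟩
    have hav : a = min iN n := by rw [ha, PySem.List.clampIdx_natCast]
    by_cases hnn : 0 ≤ (iN : Int) + bs
    · exfalso
      obtain ⟨jN, hj⟩ : ∃ jN : Nat, (jN : Int) = (iN : Int) + bs :=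
        ⟨((iN : Int) + bs).toNat, Int.toNat_of_nonneg hnn⟩
      have hbv : b = min jN n := by rw [hb, ← hj, PySem.List.clampIdx_natCast]
      omega
    · push_neg at hnn
      right
      obtain ⟨m, hm⟩ : ∃ m : Nat, (m : Int) = -((iN : Int) + bs) :=
        ⟨(-((iN : Int) + bs)).toNat, Int.toNat_of_nonneg (by omega)⟩
      have hbv : b = n - m := by
        rw [hb, show (iN : Int) + bs = -(m : Int) by omega]
        exact PySem.List.clampIdx_neg_natCast n m (by omega)
      have haiN : a = iN := by omega
      refine ⟨a, hale, by omega, ?_, ?_, ?_⟩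
      · exact h1
      · have : ((n : Int) + bs).toNat = b - a := by omega
        rw [this]
        exact h0
      · have : a + ((n : Int) + bs).toNat = b := by omega
        rw [this]
        exact h2

-- a '1'-free line always admits the zero-cost position i = n when bs < 0
theorem opsA_zero_of_onesfree (s : List Char) (bs : Int) (h1 : s.count '1' = 0) :
    pvOpsA s bs (s.length : Int) = 0 := by
  rw [opsA_zero_iff]
  have ha : PySem.List.clampIdx s.length (s.length : Int) = s.length := by
    rw [PySem.List.clampIdx_natCast]; omega
  refine ⟨?_, ?_, ?_⟩
  · rw [ha, List.take_length]; exact h1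
  · rw [ha, List.drop_length]; simp
  · have := count_drop_le s '1' (PySem.List.clampIdx s.length ((s.length : Int) + bs))
    omega

-- the converse: A's wrap shape yields a zero-cost position at i = k
theorem opsA_zero_of_shape (s : List Char) (bs : Int) (k : Nat) (hbs : bs < 0)
    (hkn : k ≤ s.length) (hklt : (k : Int) < -bs) (hnb : 0 ≤ (s.length : Int) + bs)
    (hshape : pvShapeAt s k ((s.length : Int) + bs).toNat) :
    pvOpsA s bs (k : Int) = 0 := by
  rw [opsA_zero_iff]
  set n := s.length with hn
  have ha : PySem.List.clampIdx n (k : Int) = k := by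
    rw [PySem.List.clampIdx_natCast]; omega
  obtain ⟨m, hm⟩ : ∃ m : Nat, (m : Int) = -((k : Int) + bs) :=
    ⟨(-((k : Int) + bs)).toNat, Int.toNat_of_nonneg (by omega)⟩
  have hb : PySem.List.clampIdx n ((k : Int) + bs) = n - m := by
    rw [show (k : Int) + bs = -(m : Int) by omega]
    exact PySem.List.clampIdx_neg_natCast n m (by omega)
  obtain ⟨hs1, hs0, hs2⟩ := hshape
  have hw : ((n : Int) + bs).toNat = (n - m) - k := by omega
  refine ⟨?_, ?_, ?_⟩
  · rw [ha]; exact hs1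
  · rw [ha, hb, ← hw]; exact hs0
  · rw [hb, show n - m = k + ((n : Int) + bs).toNat by omega]; exact hs2

-- per line: same flag, given the input is not a wrap accident
theorem line_flag_eq (cells : List Int) (bs : Int)
    (hacc : ¬ pvNegAccident (pvJoinDigits cells) bs) :
    (operations_needed cells bs != some 0) = !pvFixable cells bs := by
  have hbool : ∀ x y : Bool, (x = false ↔ y = true) → x = !y := by decide
  apply hbool
  rw [noflag_iff, fixable_iff]
  set s := pvJoinDigits cells with hs
  set n := s.length with hn
  set d := PySem.List.clampIdx (n + 1) bs with hd
  rcases (by omega : 0 ≤ bs ∨ bs < 0) with hbs | hbs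
  · -- bs ≥ 0: both sides are 'some window of width bs fits with cost 0'
    obtain ⟨bsN, rfl⟩ : ∃ b : Nat, (b : Int) = bs := ⟨bs.toNat, Int.toNat_of_nonneg hbs⟩
    have hdv : d = min bsN (n + 1) := by rw [hd, PySem.List.clampIdx_natCast]
    constructor
    · rintro ⟨i, hiL, hz⟩
      rw [PySem.List.mem_pyRange_one] at hiL
      obtain ⟨iN, rfl⟩ : ∃ iN : Nat, (iN : Int) = i := ⟨i.toNat, Int.toNat_of_nonneg hiL.1⟩
      have hins : iN + bsN ≤ n := by omega
      rw [opsA_zero_iff] at hz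
      have ha : PySem.List.clampIdx n (iN : Int) = iN := by
        rw [PySem.List.clampIdx_natCast]; omega
      have hbv : PySem.List.clampIdx n ((iN : Int) + (bsN : Int)) = iN + bsN := by
        rw [show (iN : Int) + (bsN : Int) = ((iN + bsN : Nat) : Int) by push_cast; ring,
            PySem.List.clampIdx_natCast]
        omega
      rw [ha, hbv] at hz
      refine ⟨iN, by omega, ?_⟩
      unfold shapeSum
      rw [show d = bsN by omega]
      rw [show iN + bsN - iN = bsN by omega] at hz
      omega
    · rintro ⟨k, hkd, hz⟩
      have hdn : d = bsN := by omega
      refine ⟨(k : Int), ?_, ?_⟩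
      · rw [PySem.List.mem_pyRange_one]
        constructor
        · positivity
        · push_cast; omega
      · rw [opsA_zero_iff]
        have ha : PySem.List.clampIdx n (k : Int) = k := by
          rw [PySem.List.clampIdx_natCast]; omega
        have hbv : PySem.List.clampIdx n ((k : Int) + (bsN : Int)) = k + bsN := by
          rw [show (k : Int) + (bsN : Int) = ((k + bsN : Nat) : Int) by push_cast; ring,
              PySem.List.clampIdx_natCast]
          omega
        rw [ha, hbv]
        unfold shapeSum at hz
        rw [hdn] at hz
        rw [show k + bsN - k = bsN by omega]
        omega
  · -- bs < 0
    obtain ⟨m, hm⟩ : ∃ m : Nat, (m : Int) = -bs := ⟨(-bs).toNat, Int.toNat_of_nonneg (by omega)⟩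
    have hm1 : 1 ≤ m := by omega
    have hdv : d = (n + 1) - m := by
      rw [hd, show bs = -(m : Int) by omega]
      exact PySem.List.clampIdx_neg_natCast (n + 1) m (by omega)
    rcases (by omega : n + 1 ≤ m ∨ m < n + 1) with hfar | hnear
    · -- bs ≤ -(n+1): both sides say 'the line is 1-free'
      have hd0 : d = 0 := by omega
      constructor
      · rintro ⟨i, hiL, hz⟩
        rw [PySem.List.mem_pyRange_one] at hiL
        rcases opsA_zero_neg s bs i hbs hiL.1 hz with h1 | ⟨k, _, _, hshape⟩
        · exact ⟨0, by omega, by rw [hd0, shapeSum_zero_iff_ones]; exact h1⟩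
        · have hw0 : ((n : Int) + bs).toNat = 0 := by omega
          rw [hw0] at hshape
          rw [← shapeSum_zero_iff] at hshape
          rw [shapeSum_zero_iff_ones] at hshape
          exact ⟨0, by omega, by rw [hd0, shapeSum_zero_iff_ones]; exact hshape⟩
      · rintro ⟨k, hkd, hz⟩
        rw [hd0, shapeSum_zero_iff_ones] at hz
        refine ⟨(n : Int), ?_, opsA_zero_of_onesfree s bs hz⟩
        rw [PySem.List.mem_pyRange_one]
        omega
    · -- -(n+1) < bs < 0 and no accident: the two wrap readings agree, and each side
      -- is exactly its reading
      have hmn : m ≤ n := by omega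
      have hpre1 : -(n : Int) - 1 < bs := by omega
      have hdval : d = ((n : Int) + bs + 1).toNat := by omega
      have hiff : pvWrapFixA s bs ↔ pvWrapFixB s bs := by
        by_contra h
        exact hacc ⟨hpre1, hbs, h⟩
      have hA : (∃ i ∈ PySem.List.pyRange 0 ((n : Int) - bs + 1) 1, pvOpsA s bs i = 0)
          ↔ pvWrapFixA s bs := by
        constructor
        · rintro ⟨i, hiL, hz⟩
          rw [PySem.List.mem_pyRange_one] at hiL
          exact opsA_zero_neg s bs i hbs hiL.1 hz
        · intro hfix
          rcases hfix with h1 | ⟨k, hk, hklt, hshape⟩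
          · refine ⟨(n : Int), ?_, opsA_zero_of_onesfree s bs h1⟩
            rw [PySem.List.mem_pyRange_one]; omega
          · refine ⟨(k : Int), ?_, opsA_zero_of_shape s bs k hbs hk hklt (by omega) hshape⟩
            rw [PySem.List.mem_pyRange_one]
            constructor
            · positivity
            · omega
      have hB : (∃ k : Nat, k + d ≤ n ∧ shapeSum s k d = 0) ↔ pvWrapFixB s bs := by
        unfold pvWrapFixB
        constructor
        · rintro ⟨k, hkd, hz⟩
          rw [shapeSum_zero_iff, hdval] at hz
          exact ⟨k, by omega, by omega, hz⟩
        · rintro ⟨k, hk, hklt, hshape⟩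
          refine ⟨k, by omega, ?_⟩
          rw [shapeSum_zero_iff, hdval]
          exact hshape
      rw [hA, hB]
      exact hiff

theorem compute_wrong_coordinates_spec : Claim_equal_compute_wrong_coordinates := by
  intro table rc cc _hDom hPre
  obtain ⟨hlen_r, hlen_c, hacc_r, hacc_c⟩ := hPre
  unfold Spec_compute_wrong_coordinates
  simp only [compute_wrong_coordinates, compute_wrong_coordinates_alt]
  rw [PySem.List.foldl_append_if (fun p : Int × List Int => operations_needed p.2 (PySem.List.pyGetD rc p.1 0) != some 0) (fun p => p.1),
      PySem.List.foldl_append_if (fun p : Int × List Int => operations_needed p.2 (PySem.List.pyGetD cc p.1 0) != some 0) (fun p => p.1)]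
  have hcols_len : (pyZipCols table).length = ((table.map List.length).min?).getD 0 := by
    unfold pyZipCols
    cases h : (table.map List.length).min? with
    | none => simp
    | some m => simp
  have hfilter : ∀ (xs : List Int) (es : List (List Int)),
      (∀ i < es.length, ¬ pvNegAccident (pvJoinDigits (es.getD i [])) (xs.getD i 0)) →
      (PySem.List.enumerate es 0).filter
        (fun p => operations_needed p.2 (PySem.List.pyGetD xs p.1 0) != some 0)
      = (PySem.List.enumerate es 0).filter
        (fun p => !pvFixable p.2 (PySem.List.pyGetD xs p.1 0)) := by
    intro xs es hes
    apply List.filter_congr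
    intro p hp
    rw [PySem.List.mem_enumerate_iff] at hp
    obtain ⟨k, hk, rfl⟩ := hp
    simp only [zero_add]
    rw [PySem.List.pyGetD_natCast]
    apply line_flag_eq
    have := hes k hk
    rwa [List.getD_eq_getElem _ _ hk] at this
  have hacc_r' : ∀ i < table.length, ¬ pvNegAccident (pvJoinDigits (table.getD i [])) (rc.getD i 0) := hacc_r
  have hacc_c' : ∀ j < (pyZipCols table).length, ¬ pvNegAccident (pvJoinDigits ((pyZipCols table).getD j [])) (cc.getD j 0) := by
    intro j hj
    exact hacc_c j (by omega)
  rw [hfilter rc table hacc_r', hfilter cc (pyZipCols table) hacc_c']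
  simp only [List.nil_append]
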